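-- pv_equiv track=rewrite | github.com/alexygr/Python | les_5_task_2.py | hexa_sum
-- ===== SOURCE A (Python) =====
-- from collections import Counter
--
-- def hexa_sum(x, y):
--     x = x[::-1]
--     y = y[::-1]
--
--     if len(x) > len(y):
--         y += '0' * (len(x) - len(y))
--     else:
--         x += '0' * (len(y) - len(x))
--
--     _sum = []
--     m = 0
--     for i, j in zip(x, y):
--         n = m + hexa[i] + hexa[j]
--         if n > 15:
--             m = n // 16
--             n %= 16
--         else:
--             m = 0
--         _sum += str(hexa[n])
--     if m > 0:
--         _sum += hexa[m]
--     return _sum[::-1]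
--
-- hexa = Counter({'0': 0, '1': 1, '2': 2, '3': 3, '4': 4, '5': 5, '6': 6, '7': 7, '8': 8, '9': 9,
--                 'A': 10, 'B': 11, 'C': 12, 'D': 13, 'E': 14, 'F': 15,
--                 'a': 10, 'b': 11, 'c': 12, 'd': 13, 'e': 14, 'f': 15,
--                 0: '0', 1: '1', 2: '2', 3: '3', 4: '4', 5: '5', 6: '6', 7: '7', 8: '8', 9: '9',
--                 10: 'A', 11: 'B', 12: 'C', 13: 'D', 14: 'E', 15: 'F'})
-- ===== SOURCE B (Python) =====
-- DIGITS = '0123456789ABCDEF'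
-- HEXVAL = {c: i for i, c in enumerate(DIGITS)}
-- for _i, _c in enumerate('abcdef'):
--     HEXVAL[_c] = 10 + _i
--
-- def _value(s):
--     v = 0
--     for ch in s:
--         v = v * 16 + HEXVAL.get(ch, 0)
--     return v
--
-- def hexa_sum(x, y):
--     t = _value(x) + _value(y)
--     out = []
--     for _ in range(max(len(x), len(y))):
--         out.append(DIGITS[t % 16])
--         t //= 16
--     if t > 0:
--         out.append(DIGITS[t])
--     return list(reversed(out))
-- ===== Notes on version B (the rewrite author's own statement) =====
-- stated objective: alternative
-- what changed: Replaces A's reverse/pad/zip digit-by-digit carried addition with a Horner evaluation of each string's integer value followed by extracting the sum's base-16 digits with a running quotient (t % 16, t //= 16); trades A's per-digit small-int arithmetic for big-integer arithmetic on the total.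
import Mathlib
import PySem

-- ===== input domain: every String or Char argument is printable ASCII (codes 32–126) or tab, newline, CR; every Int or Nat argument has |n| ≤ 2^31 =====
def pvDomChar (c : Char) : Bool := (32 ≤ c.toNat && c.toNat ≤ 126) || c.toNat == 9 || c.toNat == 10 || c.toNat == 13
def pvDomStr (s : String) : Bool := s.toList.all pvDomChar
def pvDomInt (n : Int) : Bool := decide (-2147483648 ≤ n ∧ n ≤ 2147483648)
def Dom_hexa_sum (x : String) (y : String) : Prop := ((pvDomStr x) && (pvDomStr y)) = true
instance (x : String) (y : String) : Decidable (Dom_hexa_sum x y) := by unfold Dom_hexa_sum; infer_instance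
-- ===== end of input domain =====

-- B replaces A's reverse/pad/zip digit-by-digit carry loop by a Horner evaluation of each
-- string's integer value followed by running-quotient base-16 digit extraction; objective:
-- alternative (same result, not measured faster).

-- ===== PORT A =====
-- A's Counter `hexa` mixes str and int keys; A only ever looks up chars (default 0 for a
-- missing key, Counter semantics) and ints 0..15 (always present on A's reachable values,
-- where moreover str(hexa[n]) = hexa[n]; the default "0" below is str(0), for the only
-- int-key Counter default A's `str(hexa[n])` could produce).
def hexaChr : PySem.Dict Char Int := PySem.Dict.ofList
  [('0',0),('1',1),('2',2),('3',3),('4',4),('5',5),('6',6),('7',7),('8',8),('9',9),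
   ('A',10),('B',11),('C',12),('D',13),('E',14),('F',15),
   ('a',10),('b',11),('c',12),('d',13),('e',14),('f',15)]
def hexaInt : PySem.Dict Int String := PySem.Dict.ofList
  [(0,"0"),(1,"1"),(2,"2"),(3,"3"),(4,"4"),(5,"5"),(6,"6"),(7,"7"),(8,"8"),(9,"9"),
   (10,"A"),(11,"B"),(12,"C"),(13,"D"),(14,"E"),(15,"F")]

-- the body of A's for-loop (one carried digit addition)
def stepA (st : List String × Int) (p : Char × Char) : List String × Int :=
  let n := st.2 + hexaChr.getD p.1 0 + hexaChr.getD p.2 0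
  let (m, n) := if n > 15 then (PySem.Int.floordiv n 16, PySem.Int.mod n 16) else (0, n)
  (st.1 ++ [hexaInt.getD n "0"], m)

def hexa_sum (x : String) (y : String) : List String :=
  let xr := (PySem.List.slice? x.toList none none (-1)).getD []   -- x[::-1] (step -1 ≠ 0: never none)
  let yr := (PySem.List.slice? y.toList none none (-1)).getD []   -- y[::-1]
  -- padding with '0' * (length difference)
  let (xp, yp) :=
    if xr.length > yr.length then (xr, yr ++ List.replicate (xr.length - yr.length) '0')
    else (xr ++ List.replicate (yr.length - xr.length) '0', yr)
  -- for i, j in zip(x, y): carried digit addition; `_sum += str(hexa[n])` appends the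
  -- one-character string (extending a list by a 1-char str appends that char).
  let st := (xp.zip yp).foldl stepA ([], 0)
  let s := if st.2 > 0 then st.1 ++ [hexaInt.getD st.2 "0"] else st.1
  (PySem.List.slice? s none none (-1)).getD []   -- _sum[::-1]

-- ===== PORT B =====
def pvDigits : List Char := "0123456789ABCDEF".toList
def pvHexval : PySem.Dict Char Int :=
  let d := (PySem.List.enumerate pvDigits).foldl
    (fun d p => d.insert p.2 (p.1 : Int)) PySem.Dict.empty
  (PySem.List.enumerate "abcdef".toList).foldl
    (fun d p => d.insert p.2 (10 + (p.1 : Int))) d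

def pvValue (s : String) : Int :=
  s.toList.foldl (fun v ch => v * 16 + pvHexval.getD ch 0) 0

-- DIGITS[j] as a 1-char string; j is provably in range wherever B evaluates it, so the
-- Option default is never taken.
def pvDigitStr (j : Int) : String :=
  ((PySem.List.pyGet? pvDigits j).map (fun ch => String.ofList [ch])).getD ""

def hexa_sum_alt (x : String) (y : String) : List String :=
  let t := pvValue x + pvValue y
  -- for _ in range(max(len(x), len(y))): out.append(DIGITS[t % 16]); t //= 16
  let st := (PySem.List.pyRange 0 ((max x.toList.length y.toList.length : Nat) : Int)).foldl
      (fun (st : Int × List String) _ =>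
        (PySem.Int.floordiv st.1 16, st.2 ++ [pvDigitStr (PySem.Int.mod st.1 16)])) (t, [])
  let out := if st.1 > 0 then st.2 ++ [pvDigitStr st.1] else st.2
  out.reverse   -- list(reversed(out))

-- ===== PRECONDITION & SPEC =====
def Spec_hexa_sum (x : String) (y : String) (out : List String) : Prop := out = hexa_sum_alt x y
instance (x : String) (y : String) (out : List String) : Decidable (Spec_hexa_sum x y out) := by unfold Spec_hexa_sum; infer_instance

-- ===== CLAIM (what is proved, stated in full; the proofs are below) =====
def Claim_equal_hexa_sum : Prop := ∀ (x : String) (y : String), Dom_hexa_sum x y → Spec_hexa_sum x y (hexa_sum x y)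

-- ===== LEMMAS AND PROOFS =====

-- little-endian base-16 value of a digit list
def lval : List Int → Int
  | [] => 0
  | a :: t => a + 16 * lval t

-- B's dict literally builds the same key/value sequence as A's char-keyed Counter entries
theorem dict_eq : pvHexval = hexaChr := by rfl

theorem lookup_eq (c : Char) : pvHexval.getD c 0 = hexaChr.getD c 0 := by
  rw [dict_eq]

theorem lookup_range (c : Char) : 0 ≤ hexaChr.getD c 0 ∧ hexaChr.getD c 0 < 16 := by
  simp only [PySem.Dict.getD, PySem.Dict.get?]
  rcases h : List.find? (fun p => p.1 == c) hexaChr.items with _ | p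
  · simp [h]
  · have hm := List.mem_of_find?_eq_some h
    have hitems : hexaChr.items =
      [('0',0),('1',1),('2',2),('3',3),('4',4),('5',5),('6',6),('7',7),('8',8),('9',9),
       ('A',10),('B',11),('C',12),('D',13),('E',14),('F',15),
       ('a',10),('b',11),('c',12),('d',13),('e',14),('f',15)] := by rfl
    rw [hitems] at hm
    simp only [List.mem_cons, List.not_mem_nil, or_false] at hm
    rcases hm with h1|h1|h1|h1|h1|h1|h1|h1|h1|h1|h1|h1|h1|h1|h1|h1|h1|h1|h1|h1|h1|h1 <;>
      subst h1 <;> simp [h]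

theorem digit_str_eq (n : Int) (h0 : 0 ≤ n) (h1 : n < 16) :
    hexaInt.getD n "0" = pvDigitStr n := by
  interval_cases n <;> decide

theorem lval_append_singleton (t : List Int) (z : Int) :
    lval (t ++ [z]) = lval t + 16 ^ t.length * z := by
  induction t with
  | nil => simp [lval]
  | cons a t ih => simp [lval, ih, pow_succ]; ring

theorem lval_nonneg (l : List Int) (h : ∀ a ∈ l, 0 ≤ a) : 0 ≤ lval l := by
  induction l with
  | nil => simp [lval]
  | cons a t ih =>
    have := h a (by simp)
    have := ih (fun b hb => h b (by simp [hb]))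
    simp only [lval]; omega

theorem lval_lt (l : List Int) (h : ∀ a ∈ l, a < 16) : lval l < 16 ^ l.length := by
  induction l with
  | nil => simp [lval]
  | cons a t ih =>
    have h1 := h a (by simp)
    have h2 := ih (fun b hb => h b (by simp [hb]))
    simp only [lval, List.length_cons, pow_succ]
    nlinarith

-- Horner loop = little-endian value of the reversed digit list
theorem horner_eq (f : Char → Int) (l : List Char) (v : Int) :
    l.foldl (fun v ch => v * 16 + f ch) v
      = v * 16 ^ l.length + lval ((l.map f).reverse) := by
  induction l generalizing v with
  | nil => simp [lval]
  | cons a t ih =>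
    simp only [List.foldl_cons, List.map_cons, List.reverse_cons, List.length_cons]
    rw [ih, lval_append_singleton]
    simp [List.length_reverse, pow_succ]
    ring

theorem lval_zip_add (f g : Char → Int) (as bs : List Char) (h : as.length = bs.length) :
    lval ((as.zip bs).map (fun p => f p.1 + g p.2))
      = lval (as.map f) + lval (bs.map g) := by
  induction as generalizing bs with
  | nil =>
    have : bs = [] := by cases bs <;> simp_all
    subst this; simp [lval]
  | cons a as ih =>
    cases bs with
    | nil => simp at h
    | cons b bs =>
      have h' : as.length = bs.length := by simpa using h
      simp only [List.zip_cons_cons, List.map_cons, lval]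
      rw [ih bs h']
      ring

theorem lval_append_zeros (l : List Int) (k : Nat) :
    lval (l ++ List.replicate k 0) = lval l := by
  induction l with
  | nil =>
    simp only [List.nil_append]
    induction k with
    | zero => rfl
    | succ k ih => simp [List.replicate_succ, lval, ih]
  | cons a t ih => simp [lval, ih]

-- A's carried-addition loop produces exactly the base-16 digits of the total.
theorem loop_digits (ps : List (Char × Char)) (acc : List String) (c : Int)
    (hc0 : 0 ≤ c) (hc1 : c < 2) :
    ps.foldl stepA (acc, c)
    = (acc ++ (List.range ps.length).map (fun i =>
        hexaInt.getD ((c + lval (ps.map (fun p => hexaChr.getD p.1 0 + hexaChr.getD p.2 0))) / 16 ^ i % 16) "0"),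
       (c + lval (ps.map (fun p => hexaChr.getD p.1 0 + hexaChr.getD p.2 0))) / 16 ^ ps.length) := by
  induction ps generalizing acc c with
  | nil => simp [lval]
  | cons p ps ih =>
    have ha := lookup_range p.1
    have hb := lookup_range p.2
    set a := hexaChr.getD p.1 0 with hadef
    set b := hexaChr.getD p.2 0 with hbdef
    have hstep : (if c + a + b > 15
          then (PySem.Int.floordiv (c + a + b) 16, PySem.Int.mod (c + a + b) 16)
          else ((0 : Int), c + a + b))
        = ((c + a + b) / 16, (c + a + b) % 16) := by
      rw [PySem.Int.floordiv_eq_ediv_of_pos (by norm_num),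
          PySem.Int.mod_eq_emod_of_pos (by norm_num)]
      split_ifs with hgt
      · rfl
      · rw [Int.ediv_eq_zero_of_lt (by omega) (by omega), Int.emod_eq_of_lt (by omega) (by omega)]
    rw [List.foldl_cons]
    have happ : stepA (acc, c) p
        = (acc ++ [hexaInt.getD ((c + a + b) % 16) "0"], (c + a + b) / 16) := by
      show (match (if c + a + b > 15
            then (PySem.Int.floordiv (c + a + b) 16, PySem.Int.mod (c + a + b) 16)
            else ((0 : Int), c + a + b)) with
        | (m, n) => (acc ++ [hexaInt.getD n "0"], m)) = _
      rw [hstep]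
    rw [happ, ih _ _ (by omega) (by omega)]
    set R := lval (ps.map (fun p => hexaChr.getD p.1 0 + hexaChr.getD p.2 0)) with hRdef
    have hS : c + lval ((p :: ps).map (fun p => hexaChr.getD p.1 0 + hexaChr.getD p.2 0))
        = (c + a + b) + 16 * R := by
      simp only [List.map_cons, lval, ← hadef, ← hbdef, ← hRdef]; ring
    have hdiv : ∀ i : Nat, ((c + a + b) + 16 * R) / 16 ^ (i + 1) = ((c + a + b) / 16 + R) / 16 ^ i := by
      intro i
      rw [pow_succ, mul_comm (16 ^ i) 16, ← Int.ediv_ediv_of_nonneg (by norm_num)]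
      congr 1
      omega
    simp only [Prod.mk.injEq]
    constructor
    · rw [hS, List.length_cons, List.range_succ_eq_map, List.map_cons, List.map_map,
          List.append_assoc]
      congr 1
      rw [List.singleton_append]
      congr 1
      · congr 1
        simp only [pow_zero, Int.ediv_one]
        omega
      · apply List.map_congr_left
        intro i _
        simp only [Function.comp_apply]
        rw [hdiv i]
    · rw [hS, List.length_cons, hdiv ps.length]

theorem val_horner (s : String) :
    pvValue s = lval (s.toList.reverse.map (fun ch => hexaChr.getD ch 0)) := by
  unfold pvValue
  simp only [lookup_eq]
  rw [horner_eq]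
  simp [List.map_reverse]

theorem lval_pad (l : List Char) (k : Nat) :
    lval ((l ++ List.replicate k '0').map (fun ch => hexaChr.getD ch 0)) =
      lval (l.map (fun ch => hexaChr.getD ch 0)) := by
  rw [List.map_append, List.map_replicate]
  have h0 : hexaChr.getD '0' 0 = 0 := by rfl
  rw [h0, lval_append_zeros]

theorem lval_map_nonneg (l : List Char) :
    0 ≤ lval (l.map (fun ch => hexaChr.getD ch 0)) := by
  apply lval_nonneg
  intro a ha
  rcases List.mem_map.1 ha with ⟨c, _, rfl⟩
  exact (lookup_range c).1

theorem lval_map_lt (l : List Char) :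
    lval (l.map (fun ch => hexaChr.getD ch 0)) < 16 ^ l.length := by
  have := lval_lt (l.map (fun ch => hexaChr.getD ch 0)) (by
    intro a ha
    rcases List.mem_map.1 ha with ⟨c, _, rfl⟩
    exact (lookup_range c).2)
  simpa using this

-- B's running-quotient loop emits the base-16 digits positionally.
theorem alt_loop (L : Nat) (t : Int) (out : List String) :
    (List.range L).foldl
      (fun (st : Int × List String) _ =>
        (PySem.Int.floordiv st.1 16, st.2 ++ [pvDigitStr (PySem.Int.mod st.1 16)])) (t, out)
    = (PySem.Int.floordiv t (16 ^ L),
       out ++ (List.range L).map (fun i => pvDigitStr (PySem.Int.mod (PySem.Int.floordiv t (16 ^ i)) 16))) := by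
  induction L generalizing out with
  | zero => simp
  | succ L ih =>
    rw [List.range_succ, List.foldl_append, ih, List.foldl_cons, List.foldl_nil,
        List.map_append, List.map_singleton, ← List.append_assoc]
    have hpow : ∀ k : Nat, PySem.Int.floordiv t (16 ^ k) = t / 16 ^ k :=
      fun k => PySem.Int.floordiv_eq_ediv_of_pos (by positivity)
    have h16 : ∀ u : Int, PySem.Int.floordiv u 16 = u / 16 :=
      fun u => PySem.Int.floordiv_eq_ediv_of_pos (by norm_num)
    have hstep : ∀ k : Nat, (t / 16 ^ k) / 16 = t / 16 ^ (k + 1) := by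
      intro k
      rw [Int.ediv_ediv_of_nonneg (by positivity : (0:Int) ≤ 16 ^ k), ← pow_succ]
    simp only [hpow, h16, hstep]

-- A's whole loop + carry + reverse, on equal-length padded lists, equals B's positional form.
theorem AB_core (xl yl : List Char) (L : Nat) (hx : xl.length = L) (hy : yl.length = L)
    (S : Int)
    (hS : S = lval (xl.map (fun c => hexaChr.getD c 0)) + lval (yl.map (fun c => hexaChr.getD c 0))) :
    (let st := (xl.zip yl).foldl stepA ([], 0)
     let s := if st.2 > 0 then st.1 ++ [hexaInt.getD st.2 "0"] else st.1
     s.reverse)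
    = (let out := (List.range L).map (fun i => pvDigitStr (S / 16 ^ i % 16))
       let out := if S / 16 ^ L > 0 then out ++ [pvDigitStr (S / 16 ^ L)] else out
       out.reverse) := by
  have hzlen : (xl.zip yl).length = L := by simp [List.length_zip, hx, hy]
  have hS' : S = 0 + lval ((xl.zip yl).map (fun p => hexaChr.getD p.1 0 + hexaChr.getD p.2 0)) := by
    have hz := lval_zip_add (fun c => hexaChr.getD c 0) (fun c => hexaChr.getD c 0) xl yl
      (hx.trans hy.symm)
    rw [hS, ← hz]
    simp
  have hS0 : 0 ≤ S := by
    rw [hS]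
    have := lval_map_nonneg xl
    have := lval_map_nonneg yl
    omega
  have hS2 : S < 2 * 16 ^ L := by
    have h1 := lval_map_lt xl
    have h2 := lval_map_lt yl
    rw [hx] at h1; rw [hy] at h2
    omega
  have hcarry_lt : S / 16 ^ L < 2 := by
    rw [Int.ediv_lt_iff_lt_mul (by positivity)]
    omega
  have hcarry_nn : 0 ≤ S / 16 ^ L := Int.ediv_nonneg hS0 (by positivity)
  rw [loop_digits _ [] 0 le_rfl (by norm_num), ← hS', hzlen]
  simp only [List.nil_append]
  have hdig : ∀ i : Nat, hexaInt.getD (S / 16 ^ i % 16) "0" = pvDigitStr (S / 16 ^ i % 16) := by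
    intro i
    exact digit_str_eq _ (Int.emod_nonneg _ (by norm_num)) (Int.emod_lt_of_pos _ (by norm_num))
  simp only [hdig]
  congr 1
  split_ifs with h
  · rw [digit_str_eq _ hcarry_nn (by omega)]
  · rfl

-- ===== VERDICT (by name: the statement is the Claim_ definition above) =====
theorem hexa_sum_spec : Claim_equal_hexa_sum := by
  intro x y _
  show hexa_sum x y = hexa_sum_alt x y
  simp only [hexa_sum, hexa_sum_alt, PySem.List.slice?_none_none_neg_one, Option.getD_some]
  have hfd : ∀ (t : Int) (k : Nat), PySem.Int.floordiv t (16 ^ k) = t / 16 ^ k := by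
    intro t k
    exact PySem.Int.floordiv_eq_ediv_of_pos (by positivity)
  have hmd : ∀ t : Int, PySem.Int.mod t 16 = t % 16 := by
    intro t
    exact PySem.Int.mod_eq_emod_of_pos (by norm_num)
  rw [PySem.List.pyRange_zero_natCast, List.foldl_map, alt_loop]
  simp only [List.nil_append, hfd, hmd]
  set f := fun ch => hexaChr.getD ch 0 with hf
  have hvx := val_horner x
  have hvy := val_horner y
  set L := max x.toList.length y.toList.length with hL
  by_cases hlen : x.toList.reverse.length > y.toList.reverse.length
  · rw [if_pos hlen]
    have hxL : x.toList.reverse.length = L := by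
      simp only [List.length_reverse] at hlen ⊢
      omega
    have hyL : (y.toList.reverse ++ List.replicate (x.toList.reverse.length - y.toList.reverse.length) '0').length = L := by
      simp only [List.length_append, List.length_reverse, List.length_replicate] at hlen ⊢
      omega
    rw [AB_core _ _ L hxL hyL (pvValue x + pvValue y)
      (by rw [hvx, hvy, lval_pad])]
  · rw [if_neg hlen]
    have hyL : y.toList.reverse.length = L := by
      simp only [List.length_reverse] at hlen ⊢
      omega
    have hxL : (x.toList.reverse ++ List.replicate (y.toList.reverse.length - x.toList.reverse.length) '0').length = L := by
      simp only [List.length_append, List.length_reverse, List.length_replicate] at hlen ⊢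
      omega
    rw [AB_core _ _ L hxL hyL (pvValue x + pvValue y)
      (by rw [hvx, hvy, lval_pad])]
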